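-- pv_equiv track=rewrite | github.com/julianfleck/metasphere-agents | metasphere/cli/agents.py | _parse_contract_from_harness
-- ===== SOURCE A (Python) =====
-- def _parse_contract_from_harness(harness_text: str) -> dict[str, str]:
--     """Extract authority/responsibility/accountability from a rendered
--     Delegation Contract block in a harness.md file.
--     """
--     result: dict[str, str] = {}
--     mapping = {
--         "### Authority (what you MAY do)": "authority",
--         "### Responsibility (what you MUST produce)": "responsibility",
--         "### Accountability (how parent will verify)": "accountability",
--     }
--     current_key = ""
--     lines: list[str] = []
--     for line in harness_text.splitlines():
--         if line in mapping:
--             if current_key: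
--                 result[current_key] = "\n".join(lines).strip()
--             current_key = mapping[line]
--             lines = []
--         elif line.startswith("### ") or line.startswith("## ") or line == "---":
--             if current_key:
--                 result[current_key] = "\n".join(lines).strip()
--                 current_key = ""
--                 lines = []
--         elif current_key:
--             lines.append(line)
--     if current_key:
--         result[current_key] = "\n".join(lines).strip()
--     return result
-- ===== SOURCE B (Python) =====
-- def _parse_contract_from_harness(harness_text: str) -> dict[str, str]:
--     """Extract authority/responsibility/accountability from a rendered
--     Delegation Contract block in a harness.md file.
--     """
--     mapping = {
--         "### Authority (what you MAY do)": "authority",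
--         "### Responsibility (what you MUST produce)": "responsibility",
--         "### Accountability (how parent will verify)": "accountability",
--     }
--
--     def is_boundary(l):
--         return l in mapping or l.startswith("### ") or l.startswith("## ") or l == "---"
--
--     lines = harness_text.splitlines()
--     n = len(lines)
--     result: dict[str, str] = {}
--     i = 0
--     while i < n:
--         line = lines[i]
--         if line in mapping:
--             j = i + 1
--             while j < n and not is_boundary(lines[j]):
--                 j += 1
--             result[mapping[line]] = "\n".join(lines[i + 1:j]).strip()
--             i = j
--         else:
--             i += 1
--     return result
-- ===== Notes on version B (the rewrite author's own statement) =====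
-- stated objective: alternative
-- what changed: Instead of A's single stateful scan that carries a current_key and an accumulator and flushes at every boundary, B locates each mapped header and slices its section as the lines up to the next boundary (header/###/##/---), assigning it directly.
import Mathlib
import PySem

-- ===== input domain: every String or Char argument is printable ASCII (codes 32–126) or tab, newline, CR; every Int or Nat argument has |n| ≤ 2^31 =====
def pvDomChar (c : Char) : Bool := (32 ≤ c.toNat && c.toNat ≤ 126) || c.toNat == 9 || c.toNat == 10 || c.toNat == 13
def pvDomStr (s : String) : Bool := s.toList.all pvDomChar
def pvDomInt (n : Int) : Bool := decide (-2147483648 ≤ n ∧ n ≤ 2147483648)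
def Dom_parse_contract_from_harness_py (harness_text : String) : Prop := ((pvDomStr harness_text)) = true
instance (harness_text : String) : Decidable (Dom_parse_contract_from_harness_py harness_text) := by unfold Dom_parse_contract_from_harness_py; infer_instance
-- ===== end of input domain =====

-- B replaces A's stateful scan (current_key + accumulator flushed at every boundary) by a
-- header-slicing pass: for each mapped header, the section is the lines up to the next boundary.
-- Same cost (alternative decomposition, not claimed faster).

-- ===== PORT A =====

-- A's `mapping` dict literal
def pvMapA : PySem.Dict String String := PySem.Dict.ofList
  [("### Authority (what you MAY do)", "authority"),
   ("### Responsibility (what you MUST produce)", "responsibility"),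
   ("### Accountability (how parent will verify)", "accountability")]

-- A's loop body: state = (result, current_key, lines)
def pvAStep (st : PySem.Dict String String × String × List String) (line : String) :
    PySem.Dict String String × String × List String :=
  match st with
  | (res, key, lns) =>
    if pvMapA.contains line then
      let res' := if key ≠ "" then res.insert key (PySem.Str.strip (PySem.Str.join "\n" lns)) else res
      (res', pvMapA.getD line "", [])
    else if PySem.Str.startswith line "### " || PySem.Str.startswith line "## " || line == "---" then
      if key ≠ "" then (res.insert key (PySem.Str.strip (PySem.Str.join "\n" lns)), "", [])
      else (res, key, lns)
    else if key ≠ "" then (res, key, lns ++ [line])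
    else (res, key, lns)

-- A's trailing `if current_key:` flush
def pvAFinish (st : PySem.Dict String String × String × List String) : PySem.Dict String String :=
  match st with
  | (res, key, lns) =>
    if key ≠ "" then res.insert key (PySem.Str.strip (PySem.Str.join "\n" lns)) else res

def parse_contract_from_harness_py (harness_text : String) : List (String × String) :=
  (pvAFinish ((PySem.Str.splitlines harness_text).foldl pvAStep (PySem.Dict.empty, "", []))).items

-- ===== PORT B =====

def pvMapB : PySem.Dict String String := PySem.Dict.ofList
  [("### Authority (what you MAY do)", "authority"),
   ("### Responsibility (what you MUST produce)", "responsibility"),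
   ("### Accountability (how parent will verify)", "accountability")]

def pvIsBoundary (l : String) : Bool :=
  pvMapB.contains l || PySem.Str.startswith l "### " || PySem.Str.startswith l "## " || l == "---"

-- B's outer while loop: at a mapped header, slice the section up to the next boundary (the
-- inner `while j < n` scan = takeWhile/dropWhile) and continue at that boundary (i = j).
def pvAltGo (res : PySem.Dict String String) : List String → PySem.Dict String String
  | [] => res
  | l :: ls =>
    if pvMapB.contains l then
      pvAltGo (res.insert (pvMapB.getD l "")
          (PySem.Str.strip (PySem.Str.join "\n" (ls.takeWhile (fun x => !pvIsBoundary x)))))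
        (ls.dropWhile (fun x => !pvIsBoundary x))
    else pvAltGo res ls
termination_by ls => ls.length
decreasing_by
  · exact Nat.lt_succ_of_le (List.length_dropWhile_le _ _)
  · simp

def parse_contract_from_harness_py_alt (harness_text : String) : List (String × String) :=
  (pvAltGo PySem.Dict.empty (PySem.Str.splitlines harness_text)).items

-- ===== PRECONDITION & SPEC =====
def Spec_parse_contract_from_harness_py (harness_text : String) (out : List (String × String)) : Prop := out = parse_contract_from_harness_py_alt harness_text
instance (harness_text : String) (out : List (String × String)) : Decidable (Spec_parse_contract_from_harness_py harness_text out) := by unfold Spec_parse_contract_from_harness_py; infer_instance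

-- ===== CLAIM (what is proved, stated in full; the proofs are below) =====
def Claim_equal_parse_contract_from_harness_py : Prop := ∀ (harness_text : String), Dom_parse_contract_from_harness_py harness_text → Spec_parse_contract_from_harness_py harness_text (parse_contract_from_harness_py harness_text)

-- ===== LEMMAS AND PROOFS =====

theorem pvMap_eq : pvMapA = pvMapB := rfl

theorem pvMapB_mk : pvMapB = PySem.Dict.mk
  [("### Authority (what you MAY do)", "authority"),
   ("### Responsibility (what you MUST produce)", "responsibility"),
   ("### Accountability (how parent will verify)", "accountability")] := by decide

-- a line found in the mapping maps to a nonempty key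
theorem pvGetD_ne (l : String) (h : pvMapB.contains l = true) : pvMapB.getD l "" ≠ "" := by
  rw [pvMapB_mk] at h ⊢
  rw [PySem.Dict.contains_eq_isSome_get?] at h
  rw [PySem.Dict.getD_eq_get?_getD]
  simp only [PySem.Dict.get?_mk_cons] at h ⊢
  split_ifs at h ⊢ <;> simp_all [PySem.Dict.get?]

-- a mapped header is a boundary
theorem pvBoundary_of_contains (l : String) (h : pvMapB.contains l = true) :
    pvIsBoundary l = true := by simp [pvIsBoundary, h]

-- joint invariant: A's fold (idle key / active key) versus B's slicing recursion
theorem pvMain (ls : List String) :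
    (∀ res acc, pvAFinish (ls.foldl pvAStep (res, "", acc)) = pvAltGo res ls) ∧
    (∀ res k acc, k ≠ "" →
      pvAFinish (ls.foldl pvAStep (res, k, acc)) =
        pvAltGo (res.insert k (PySem.Str.strip (PySem.Str.join "\n"
            (acc ++ ls.takeWhile (fun x => !pvIsBoundary x)))))
          (ls.dropWhile (fun x => !pvIsBoundary x))) := by
  induction ls with
  | nil =>
    constructor
    · intro res acc; simp [pvAFinish, pvAltGo]
    · intro res k acc hk; simp [pvAFinish, pvAltGo, hk]
  | cons l ls ih =>
    obtain ⟨ih1, ih2⟩ := ih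
    constructor
    · intro res acc
      rw [List.foldl_cons]
      by_cases hc : pvMapB.contains l = true
      · have hk := pvGetD_ne l hc
        simp only [pvAStep, pvMap_eq, hc, ne_eq, not_true_eq_false, if_pos, reduceIte]
        rw [ih2 _ _ _ hk, pvAltGo]
        simp [hc]
      · by_cases hb : (PySem.Str.startswith l "### " || PySem.Str.startswith l "## " || l == "---") = true
        · simp only [pvAStep, pvMap_eq, hc, hb, ne_eq, not_true_eq_false, reduceIte, Bool.false_eq_true]
          rw [ih1, pvAltGo]; simp [hc]
        · simp only [pvAStep, pvMap_eq, hc, hb, ne_eq, not_true_eq_false, reduceIte, Bool.false_eq_true]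
          rw [ih1, pvAltGo]; simp [hc]
    · intro res k acc hk
      rw [List.foldl_cons]
      by_cases hc : pvMapB.contains l = true
      · have hk' := pvGetD_ne l hc
        have hbd := pvBoundary_of_contains l hc
        simp only [pvAStep, pvMap_eq, hc, hk, ne_eq, if_pos]
        rw [ih2 _ _ _ hk']
        rw [List.takeWhile_cons, List.dropWhile_cons]
        simp [hbd, pvAltGo, hc]
      · by_cases hb : (PySem.Str.startswith l "### " || PySem.Str.startswith l "## " || l == "---") = true
        · have hbd : pvIsBoundary l = true := by
            have hb2 := hb
            unfold pvIsBoundary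
            simp only [Bool.or_eq_true] at hb2 ⊢
            tauto
          simp only [pvAStep, pvMap_eq]
          rw [if_neg hc, if_pos hb, if_pos hk]
          rw [ih1]
          rw [List.takeWhile_cons, List.dropWhile_cons]
          simp only [hbd, Bool.not_true, Bool.false_eq_true, reduceIte, List.append_nil]
          rw [pvAltGo]
          simp [hc]
        · have hbd : pvIsBoundary l = false := by
            have hb2 := hb; have hc2 := hc
            rw [Bool.eq_false_iff]
            unfold pvIsBoundary
            simp only [ne_eq, Bool.or_eq_true] at hb2 hc2 ⊢
            tauto
          simp only [pvAStep, pvMap_eq]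
          rw [if_neg hc, if_neg hb, if_pos hk]
          rw [ih2 _ _ _ hk]
          rw [List.takeWhile_cons, List.dropWhile_cons]
          simp only [hbd, Bool.not_false, reduceIte]
          rw [show acc ++ l :: List.takeWhile (fun x => !pvIsBoundary x) ls
              = (acc ++ [l]) ++ List.takeWhile (fun x => !pvIsBoundary x) ls by simp]

-- ===== VERDICT (by name: the statement is the Claim_ definition above) =====
theorem parse_contract_from_harness_py_spec : Claim_equal_parse_contract_from_harness_py := by
  intro t _
  unfold Spec_parse_contract_from_harness_py parse_contract_from_harness_py
    parse_contract_from_harness_py_alt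
  rw [(pvMain (PySem.Str.splitlines t)).1]
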